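-- pv_equiv track=rewrite | github.com/shabeeliqbal/advent-of-code-2025 | day 2/day 2 p1.py | generate_invalid_ids
-- ===== SOURCE A (Python) =====
-- def generate_invalid_ids(max_val):
--     invalid = []
--     max_len = len(str(max_val))
--     for half_len in range(1, max_len // 2 + 1):
--         start = 10**(half_len - 1)
--         end = 10**half_len
--         for half in range(start, end):
--             n = int(str(half) * 2)
--             if n > max_val:
--                 break
--             invalid.append(n)
--     return invalid
-- ===== SOURCE B (Python) =====
-- def generate_invalid_ids(max_val):
--     def blocks(k):
--         # recursive descent over digit-lengths of the half; pure concatenation, no break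
--         if k > len(str(max_val)) // 2:
--             return []
--         lo, hi = 10 ** (k - 1), 10 ** k
--         cut = lo
--         while cut < hi and int(str(cut) * 2) <= max_val:
--             cut += 1
--         return [int(str(h) * 2) for h in range(lo, cut)] + blocks(k + 1)
--     return blocks(1)
-- ===== Notes on version B (the rewrite author's own statement) =====
-- stated objective: alternative
-- what changed: Replaced A's nested for-loops with a shared mutable accumulator and an inner break by a pure recursive decomposition: a recursion over digit-length blocks, each block materialized in two phases (a boundary scan locating the first doubled value above max_val, then a comprehension over the surviving range), concatenated without any accumulator or break.
import Mathlib
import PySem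

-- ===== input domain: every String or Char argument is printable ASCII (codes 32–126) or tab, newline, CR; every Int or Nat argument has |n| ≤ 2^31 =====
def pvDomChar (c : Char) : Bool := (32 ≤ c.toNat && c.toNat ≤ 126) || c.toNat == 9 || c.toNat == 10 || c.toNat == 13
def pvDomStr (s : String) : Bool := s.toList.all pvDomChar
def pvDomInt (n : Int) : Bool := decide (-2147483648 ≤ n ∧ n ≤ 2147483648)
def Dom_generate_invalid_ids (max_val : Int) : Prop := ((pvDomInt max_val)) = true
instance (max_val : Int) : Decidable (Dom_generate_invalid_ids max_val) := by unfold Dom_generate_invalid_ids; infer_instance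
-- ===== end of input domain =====

-- B replaces A's nested loops with mutable accumulator and `break` by a pure recursive
-- decomposition (per-block boundary scan + comprehension, blocks concatenated recursively);
-- objective: alternative structure, same cost.

-- ===== PORT A =====
-- int(str(h) * 2): both Python versions contain this exact subexpression, so the helper is
-- shared by the two ports.  int() never raises here (str(h) is a digit string for h ≥ 1),
-- so the `none` case of ofStr? is unreachable and .getD 0 is a safe discharge.
def pvStrDouble (h : Int) : Int :=
  (PySem.Int.ofStr? (PySem.Int.toStr h ++ PySem.Int.toStr h)).getD 0

-- inner `for half in range(start, end): n = int(str(half)*2); if n > max_val: break; invalid.append(n)`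
def pvInnerA (max_val : Int) : List Int → List Int → List Int
  | [], invalid => invalid
  | half :: rest, invalid =>
    let n := pvStrDouble half
    if n > max_val then invalid
    else pvInnerA max_val rest (invalid ++ [n])

def generate_invalid_ids (max_val : Int) : List Int :=
  let max_len : Int := PySem.Str.len (PySem.Int.toStr max_val)
  (PySem.List.pyRange 1 (PySem.Int.floordiv max_len 2 + 1) 1).foldl
    (fun invalid half_len =>
      pvInnerA max_val
        (PySem.List.pyRange (10 ^ (half_len - 1).toNat) (10 ^ half_len.toNat) 1) invalid)
    []

-- ===== PORT B =====
-- `cut = lo; while cut < hi and int(str(cut) * 2) <= max_val: cut += 1`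
def pvCut (max_val cut hi : Int) : Int :=
  if h : cut < hi ∧ pvStrDouble cut ≤ max_val then pvCut max_val (cut + 1) hi else cut
termination_by (hi - cut).toNat
decreasing_by omega

-- recursive `blocks(k)` of Source B
def pvBlocks (max_val k : Int) : List Int :=
  if _h : k > PySem.Int.floordiv (PySem.Str.len (PySem.Int.toStr max_val)) 2 then []
  else
    let lo : Int := 10 ^ (k - 1).toNat
    let hi : Int := 10 ^ k.toNat
    let cut := pvCut max_val lo hi
    (PySem.List.pyRange lo cut 1).map (fun h => pvStrDouble h) ++ pvBlocks max_val (k + 1)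
termination_by (PySem.Int.floordiv (PySem.Str.len (PySem.Int.toStr max_val)) 2 + 1 - k).toNat
decreasing_by omega

def generate_invalid_ids_alt (max_val : Int) : List Int :=
  pvBlocks max_val 1

-- ===== PRECONDITION & SPEC =====
def Spec_generate_invalid_ids (max_val : Int) (out : List Int) : Prop := out = generate_invalid_ids_alt max_val
instance (max_val : Int) (out : List Int) : Decidable (Spec_generate_invalid_ids max_val out) := by unfold Spec_generate_invalid_ids; infer_instance

-- ===== CLAIM (what is proved, stated in full; the proofs are below) =====
def Claim_equal_generate_invalid_ids : Prop := ∀ (max_val : Int), Dom_generate_invalid_ids max_val → Spec_generate_invalid_ids max_val (generate_invalid_ids max_val)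

-- ===== LEMMAS AND PROOFS =====

-- the per-half test, and the block of halves with a given digit length
def pvP (max_val h : Int) : Bool := pvStrDouble h ≤ max_val
def pvBlock (k : Int) : List Int := PySem.List.pyRange (10 ^ (k - 1).toNat) (10 ^ k.toNat) 1
def pvTake (max_val : Int) (l : List Int) : List Int :=
  (l.takeWhile (pvP max_val)).map pvStrDouble

-- A's inner loop appends the doubled values of the longest prefix of halves that fit
theorem pvInnerA_eq (max_val : Int) (l acc : List Int) :
    pvInnerA max_val l acc = acc ++ pvTake max_val l := by
  induction l generalizing acc with
  | nil => simp [pvInnerA, pvTake]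
  | cons h t ih =>
    by_cases hp : pvStrDouble h > max_val
    · have hP : pvP max_val h = false := by simp [pvP]; omega
      simp [pvInnerA, hp, pvTake, hP]
    · have hP : pvP max_val h = true := by simp [pvP]; omega
      simp only [pvInnerA, if_neg hp, ih]
      simp [pvTake, hP, List.append_assoc]

-- the scan in B stops no earlier than its start
theorem pvCut_ge (max_val cut hi : Int) : cut ≤ pvCut max_val cut hi := by
  fun_induction pvCut max_val cut hi with
  | case1 cut h ih => omega
  | case2 cut h => omega

-- B's boundary scan followed by a range is exactly the takeWhile prefix of the block
theorem pvCut_range (max_val cut hi : Int) :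
    PySem.List.pyRange cut (pvCut max_val cut hi) 1 =
      (PySem.List.pyRange cut hi 1).takeWhile (pvP max_val) := by
  fun_induction pvCut max_val cut hi with
  | case1 cut h ih =>
    have hlt : cut < pvCut max_val (cut + 1) hi := lt_of_lt_of_le (by omega) (pvCut_ge _ _ _)
    rw [PySem.List.pyRange_one_cons hlt, PySem.List.pyRange_one_cons h.1, List.takeWhile_cons,
      show pvP max_val cut = true by simp [pvP]; omega]
    simpa using ih
  | case2 cut h =>
    rw [PySem.List.pyRange_one_eq_nil (le_refl cut)]
    rcases lt_or_ge cut hi with hlt | hge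
    · rw [PySem.List.pyRange_one_cons hlt, List.takeWhile_cons,
        show pvP max_val cut = false by simp [pvP]; omega]
      simp
    · rw [PySem.List.pyRange_one_eq_nil hge, List.takeWhile_nil]

-- A's outer fold collects the per-block prefixes
theorem pvFold_eq (max_val : Int) (l acc : List Int) :
    l.foldl (fun invalid half_len =>
        pvInnerA max_val
          (PySem.List.pyRange (10 ^ (half_len - 1).toNat) (10 ^ half_len.toNat) 1) invalid) acc =
      acc ++ l.flatMap (fun k => pvTake max_val (pvBlock k)) := by
  induction l generalizing acc with
  | nil => simp
  | cons k t ih =>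
    rw [List.foldl_cons, ih, pvInnerA_eq, List.flatMap_cons, pvBlock, List.append_assoc]

-- B's recursion computes the same per-block prefixes over the remaining digit lengths
theorem pvBlocks_eq (max_val k : Int) :
    pvBlocks max_val k =
      (PySem.List.pyRange k (PySem.Int.floordiv (PySem.Str.len (PySem.Int.toStr max_val)) 2 + 1) 1).flatMap
        (fun j => pvTake max_val (pvBlock j)) := by
  fun_induction pvBlocks max_val k with
  | case1 k h =>
    rw [PySem.List.pyRange_one_eq_nil (by omega), List.flatMap_nil]
  | case2 k h lo hi cut ih =>
    have hk : k < PySem.Int.floordiv (PySem.Str.len (PySem.Int.toStr max_val)) 2 + 1 := by omega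
    rw [PySem.List.pyRange_one_cons hk, List.flatMap_cons, ← ih]
    congr 1
    rw [pvTake, pvBlock, ← pvCut_range]

-- ===== VERDICT (by name: the statement is the Claim_ definition above) =====
theorem generate_invalid_ids_spec : Claim_equal_generate_invalid_ids := by
  intro max_val _
  unfold Spec_generate_invalid_ids generate_invalid_ids generate_invalid_ids_alt
  rw [pvFold_eq, pvBlocks_eq, List.nil_append]
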